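-- pv_equiv track=rewrite | github.com/fjarri/grunnur | grunnur/utils.py | find_local_size
-- ===== SOURCE A (Python) =====
-- from typing import Iterable, Optional, Tuple, TypeVar, Type, Sequence, Mapping
--
-- def max_factor(x: int, y: int) -> int:
--     """
--     Find the maximum `d` such that `x % d == 0` and `d <= y`.
--     """
--     if x <= y:
--         return x
--
--     result = 1
--     for d in range(2, min(int(x**0.5), y) + 1):
--         inv_d = x // d
--         if inv_d * d == x:
--             if inv_d <= y:
--                 return inv_d
--             result = d
--
--     return result
--
-- def find_local_size(
--         global_size: Sequence[int],
--         max_local_sizes: Sequence[int],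
--         max_total_local_size: int) -> Tuple[int, ...]:
--     """
--     Mimics the OpenCL local size finding algorithm.
--     Returns the tuple of the same length as ``global_size``, with every element
--     being a factor of the corresponding element of ``global_size``.
--     Neither of the elements of ``local_size`` are greater then the corresponding element
--     of ``max_local_sizes``, and their product is not greater than ``max_total_local_size``.
--     """
--     local_size = []
--     for gs, mls in zip(global_size, max_local_sizes):
--         d = max_factor(gs, min(mls, max_total_local_size))
--         max_total_local_size //= d
--         local_size.append(d)
--
--     return tuple(local_size)
-- ===== SOURCE B (Python) =====
-- from typing import Sequence, Tuple
--
-- def max_factor(x: int, y: int) -> int: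
--     """
--     Find the maximum `d` such that `x % d == 0` and `d <= y`.
--     """
--     if x <= y:
--         return x
--     for d in range(y, 0, -1):
--         if x % d == 0:
--             return d
--     return 1
--
-- def find_local_size(
--         global_size: Sequence[int],
--         max_local_sizes: Sequence[int],
--         max_total_local_size: int) -> Tuple[int, ...]:
--     local_size = []
--     budget = max_total_local_size
--     for gs, mls in zip(global_size, max_local_sizes):
--         d = max_factor(gs, min(mls, budget))
--         local_size.append(d)
--         budget //= d
--     return tuple(local_size)
-- ===== Notes on version B (the rewrite author's own statement) =====
-- stated objective: simpler
-- what changed: max_factor's sqrt-bounded trial division with paired-cofactor bookkeeping and early returns is replaced by a plain downward scan that returns the first divisor in range(y, 0, -1).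
-- outside the precondition, e.g. on find_local_size([0], [5], 10): A raises ZeroDivisionError, B raises ZeroDivisionError; on find_local_size([-4], [-6], 10): A raises TypeError, B returns (1,); on find_local_size([-4], [5], 10): A returns (-4,), B returns (-4,)
import Mathlib
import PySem

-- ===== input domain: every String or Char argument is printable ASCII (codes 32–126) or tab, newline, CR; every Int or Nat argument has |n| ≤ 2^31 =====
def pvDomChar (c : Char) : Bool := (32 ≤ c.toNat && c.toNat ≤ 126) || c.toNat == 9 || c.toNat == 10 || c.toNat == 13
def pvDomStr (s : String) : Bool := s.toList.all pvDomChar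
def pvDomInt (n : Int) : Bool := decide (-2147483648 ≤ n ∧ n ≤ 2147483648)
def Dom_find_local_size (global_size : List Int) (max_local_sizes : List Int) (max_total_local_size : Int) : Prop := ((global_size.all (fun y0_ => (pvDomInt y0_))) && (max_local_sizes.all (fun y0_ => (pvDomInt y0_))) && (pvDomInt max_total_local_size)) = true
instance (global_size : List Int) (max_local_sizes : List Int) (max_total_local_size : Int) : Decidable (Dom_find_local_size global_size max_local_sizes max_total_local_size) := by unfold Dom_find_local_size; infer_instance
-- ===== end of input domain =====

-- B replaces max_factor's sqrt-bounded trial division (with paired-cofactor bookkeeping and early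
-- returns) by a downward linear scan returning the first divisor in range(y, 0, -1), and the outer
-- loop is unchanged in spirit (ported as a foldl); simpler, no speed claim.

-- ===== PORT A =====
-- A's loop 'for d in range(2, min(int(x**0.5), y) + 1)' with early returns and the 'result' accumulator.
-- int(x**0.5) is ported as Nat.sqrt x.toNat: exact for 0 ≤ x ≤ 2^31 (double sqrt is correctly
-- rounded there); under Pre_ every call to max_factor has 1 ≤ x.
def mfLoopA (x y : Int) : List Int → Int → Int
  | [], result => result
  | d :: ds, result =>
    let inv_d := PySem.Int.floordiv x d
    if inv_d * d = x then
      if inv_d ≤ y then inv_d else mfLoopA x y ds d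
    else mfLoopA x y ds result

def max_factor_A (x y : Int) : Int :=
  if x ≤ y then x
  else mfLoopA x y (PySem.List.pyRange 2 (min ((Nat.sqrt x.toNat : Nat) : Int) y + 1) 1) 1

def flsLoopA : List (Int × Int) → Int → List Int → List Int
  | [], _, acc => acc
  | (gs, mls) :: rest, mts, acc =>
    let d := max_factor_A gs (min mls mts)
    flsLoopA rest (PySem.Int.floordiv mts d) (acc ++ [d])

def find_local_size (global_size : List Int) (max_local_sizes : List Int) (max_total_local_size : Int) : List Int :=
  flsLoopA (global_size.zip max_local_sizes) max_total_local_size []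

-- ===== PORT B =====
-- B's 'for d in range(y, 0, -1): if x % d == 0: return d', then the fallback 1.
def mfDown (x : Int) : List Int → Int
  | [] => 1
  | d :: ds => if PySem.Int.mod x d = 0 then d else mfDown x ds

def max_factor_B (x y : Int) : Int :=
  if x ≤ y then x else mfDown x (PySem.List.pyRange y 0 (-1))

-- B's 'for gs, mls in zip(...)' loop as a foldl over the zipped pairs with (list, budget) state.
def find_local_size_alt (global_size : List Int) (max_local_sizes : List Int) (max_total_local_size : Int) : List Int :=
  ((global_size.zip max_local_sizes).foldl
    (fun (st : List Int × Int) p =>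
      let d := max_factor_B p.1 (min p.2 st.2)
      (st.1 ++ [d], PySem.Int.floordiv st.2 d))
    ([], max_total_local_size)).1

-- ===== PRECONDITION & SPEC =====
-- Pre_ restricts to positive zipped global sizes (the function's natural domain). On nonpositive
-- gs, whether A raises (ZeroDivisionError for gs = 0 under a nonnegative budget cap, TypeError via
-- complex ** for a negative gs above the cap) or returns depends on the RUNNING budget
-- max_total_local_size //= d, which is not expressible as a closed-form condition on the input;
-- the excluded inputs on which A does return (negative gs below the cap) are cited in claim.json.
def Pre_find_local_size (global_size : List Int) (max_local_sizes : List Int) (max_total_local_size : Int) : Prop :=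
  ∀ p ∈ global_size.zip max_local_sizes, 1 ≤ p.1
instance (global_size : List Int) (max_local_sizes : List Int) (max_total_local_size : Int) : Decidable (Pre_find_local_size global_size max_local_sizes max_total_local_size) := by unfold Pre_find_local_size; infer_instance

def pvWitness_find_local_size : List Int × List Int × Int := ([12, 35, 9], [8, 6, 4], 64)

def Spec_find_local_size (global_size : List Int) (max_local_sizes : List Int) (max_total_local_size : Int) (out : List Int) : Prop := out = find_local_size_alt global_size max_local_sizes max_total_local_size
instance (global_size : List Int) (max_local_sizes : List Int) (max_total_local_size : Int) (out : List Int) : Decidable (Spec_find_local_size global_size max_local_sizes max_total_local_size out) := by unfold Spec_find_local_size; infer_instance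

-- ===== CLAIM (what is proved, stated in full; the proofs are below) =====
def Claim_equal_find_local_size : Prop := ∀ (global_size : List Int) (max_local_sizes : List Int) (max_total_local_size : Int), Dom_find_local_size global_size max_local_sizes max_total_local_size → Pre_find_local_size global_size max_local_sizes max_total_local_size → Spec_find_local_size global_size max_local_sizes max_total_local_size (find_local_size global_size max_local_sizes max_total_local_size)

-- ===== LEMMAS AND PROOFS =====

-- g is the greatest divisor of x that is ≤ y (or the fallback 1 when none exists).
def IsBest (x y g : Int) : Prop :=
  1 ≤ g ∧ (g = 1 ∨ (g ∣ x ∧ g ≤ y)) ∧ ∀ e, 1 ≤ e → e ∣ x → e ≤ y → e ≤ g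

lemma isBest_uniq (x y g g' : Int) (hg : IsBest x y g) (hg' : IsBest x y g') : g = g' := by
  obtain ⟨h1, h2, h3⟩ := hg
  obtain ⟨h1', h2', h3'⟩ := hg'
  rcases h2 with rfl | ⟨hd, hy⟩
  · rcases h2' with rfl | ⟨hd', hy'⟩
    · rfl
    · have := h3 g' h1' hd' hy'; omega
  · rcases h2' with rfl | ⟨hd', hy'⟩
    · have := h3' g h1 hd hy; omega
    · exact le_antisymm (h3' g h1 hd hy) (h3 g' h1' hd' hy')

-- the cofactor of a positive divisor
lemma cofactor_facts (x e : Int) (hx : 1 ≤ x) (he : 1 ≤ e) (hd : e ∣ x) :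
    (x / e) ∣ x ∧ 1 ≤ x / e ∧ e * (x / e) = x := by
  obtain ⟨c, hc⟩ := hd
  have he0 : e ≠ 0 := by omega
  have hxe : x / e = c := by rw [hc, Int.mul_ediv_cancel_left _ he0]
  refine ⟨⟨e, by rw [hxe, hc, mul_comm]⟩, ?_, by rw [hxe, ← hc]⟩
  rw [hxe]
  nlinarith [hc]

-- a proper positive divisor has cofactor ≥ 2
lemma cofactor_two (x e : Int) (hx : 1 ≤ x) (he : 1 ≤ e) (hexy : e < x) (hd : e ∣ x) :
    2 ≤ x / e := by
  obtain ⟨_, h1, hmul⟩ := cofactor_facts x e hx he hd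
  nlinarith

lemma le_sqrtInt_iff (x c : Int) (hx : 0 ≤ x) (hc : 0 ≤ c) :
    c ≤ ((Nat.sqrt x.toNat : Nat) : Int) ↔ c * c ≤ x := by
  have hc' : ((c.toNat : Nat) : Int) = c := by omega
  have hx' : ((x.toNat : Nat) : Int) = x := by omega
  have h1 : c ≤ ((Nat.sqrt x.toNat : Nat) : Int) ↔ c.toNat ≤ Nat.sqrt x.toNat := by omega
  rw [h1, Nat.le_sqrt]
  constructor
  · intro h
    have h2 : ((c.toNat * c.toNat : Nat) : Int) ≤ ((x.toNat : Nat) : Int) := by exact_mod_cast h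
    push_cast at h2
    rw [hc', hx'] at h2
    exact h2
  · intro h
    have h2 : ((c.toNat * c.toNat : Nat) : Int) ≤ ((x.toNat : Nat) : Int) := by
      push_cast
      rw [hc', hx']
      exact h
    exact_mod_cast h2

-- A's loop invariant: r is the best divisor among [1, k), no early return has fired for d ∈ [2, k)
lemma loopA_isBest (x y : Int) (hx : 1 ≤ x) (hxy : y < x) :
    ∀ (n : Nat) (k r : Int), k + n = min ((Nat.sqrt x.toNat : Nat) : Int) y + 1 → 2 ≤ k →
      1 ≤ r → (r = 1 ∨ (r ∣ x ∧ r ≤ y)) → r < k →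
      (∀ e, 1 ≤ e → e ∣ x → e ≤ y → e < k → e ≤ r) →
      (∀ c, 2 ≤ c → c < k → c ∣ x → y < x / c) →
      IsBest x y (mfLoopA x y (PySem.List.pyRange k (min ((Nat.sqrt x.toNat : Nat) : Int) y + 1) 1) r) := by
  intro n
  induction n with
  | zero =>
    intro k r hk h2 hr1 hr2 hrk hmax hearly
    rw [PySem.List.pyRange_one_eq_nil (by omega)]
    refine ⟨hr1, hr2, ?_⟩
    intro e he1 hed hey
    by_cases hek : e < k
    · exact hmax e he1 hed hey hek
    · exfalso
      push Not at hek
      have hm : ((Nat.sqrt x.toNat : Nat) : Int) < e := by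
        rcases min_cases ((Nat.sqrt x.toNat : Nat) : Int) y with ⟨hmin, _⟩ | ⟨hmin, _⟩ <;> omega
      obtain ⟨hcd, hc1, hmul⟩ := cofactor_facts x e hx he1 hed
      have hc2 : 2 ≤ x / e := cofactor_two x e hx he1 (by omega) hed
      have hcs : x / e ≤ ((Nat.sqrt x.toNat : Nat) : Int) := by
        rw [le_sqrtInt_iff x _ (by omega) (by omega)]
        by_contra hcc
        push Not at hcc
        have hee : e * e < e * (x / e) := by nlinarith
        have : e * e ≤ x := by nlinarith
        have := (le_sqrtInt_iff x e (by omega) (by omega)).mpr this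
        omega
      have := hearly (x / e) hc2 (by omega) hcd
      obtain ⟨_, _, hmul2⟩ := cofactor_facts x (x / e) hx (by omega) hcd
      have : x / (x / e) = e := by nlinarith
      omega
  | succ n ih =>
    intro k r hk h2 hr1 hr2 hrk hmax hearly
    have hklt : k < min ((Nat.sqrt x.toNat : Nat) : Int) y + 1 := by omega
    have hky : k ≤ y := by
      rcases min_cases ((Nat.sqrt x.toNat : Nat) : Int) y with ⟨hmin, _⟩ | ⟨hmin, _⟩ <;> omega
    rw [PySem.List.pyRange_one_cons hklt]
    simp only [mfLoopA]
    rw [PySem.Int.floordiv_eq_ediv_of_pos (by omega)]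
    by_cases hdvd : k ∣ x
    · obtain ⟨hcd, hc1, hmul⟩ := cofactor_facts x k hx (by omega) hdvd
      rw [if_pos (by nlinarith)]
      by_cases hcy : x / k ≤ y
      · rw [if_pos hcy]
        refine ⟨hc1, Or.inr ⟨hcd, hcy⟩, ?_⟩
        intro e he1 hed hey
        by_contra hgt
        push Not at hgt
        obtain ⟨hcd', hc1', hmul'⟩ := cofactor_facts x e hx he1 hed
        have hc2' : 2 ≤ x / e := cofactor_two x e hx he1 (by omega) hed
        have hck : x / e < k := by nlinarith
        have := hearly (x / e) hc2' hck hcd'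
        obtain ⟨_, _, hmul2⟩ := cofactor_facts x (x / e) hx (by omega) hcd'
        have : x / (x / e) = e := by nlinarith
        omega
      · rw [if_neg hcy]
        push Not at hcy
        apply ih (k + 1) k (by omega) (by omega) (by omega)
          (Or.inr ⟨hdvd, hky⟩) (by omega)
        · intro e he1 hed hey hek
          by_cases h : e < k
          · have := hmax e he1 hed hey h; omega
          · omega
        · intro c hc2 hck hcd'
          by_cases h : c < k
          · exact hearly c hc2 h hcd'
          · have : c = k := by omega
            subst this; exact hcy
    · rw [if_neg (by intro h; exact hdvd ⟨x / k, by linarith [h]⟩)]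
      apply ih (k + 1) r (by omega) (by omega) hr1 hr2 (by omega)
      · intro e he1 hed hey hek
        by_cases h : e < k
        · exact hmax e he1 hed hey h
        · exfalso; have : e = k := by omega
          subst this; exact hdvd hed
      · intro c hc2 hck hcd'
        by_cases h : c < k
        · exact hearly c hc2 h hcd'
        · exfalso; have : c = k := by omega
          subst this; exact hdvd hcd'

lemma maxFactorA_isBest (x y : Int) (hx : 1 ≤ x) (hxy : y < x) :
    IsBest x y (max_factor_A x y) := by
  unfold max_factor_A
  rw [if_neg (by omega)]
  set m : Int := min ((Nat.sqrt x.toNat : Nat) : Int) y with hm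
  by_cases h1m : 1 ≤ m
  · apply loopA_isBest x y hx hxy (m - 1).toNat 2 1 (by omega) (by omega) (by omega)
      (Or.inl rfl) (by omega)
    · intro e he1 _ _ hek
      omega
    · intro c hc2 hck _
      omega
  · have hs1 : 1 ≤ ((Nat.sqrt x.toNat : Nat) : Int) := by
      rw [le_sqrtInt_iff x 1 (by omega) (by omega)]; omega
    have hy0 : y ≤ 0 := by omega
    rw [PySem.List.pyRange_one_eq_nil (by omega)]
    refine ⟨le_refl 1, Or.inl rfl, ?_⟩
    intro e he1 _ hey
    omega

-- B's downward scan from k: if no divisor lies in (k, y], its result is the best divisor ≤ y.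
lemma mfDown_isBest (x y : Int) (hx : 1 ≤ x) :
    ∀ (n : Nat) (k : Int), k ≤ n → k ≤ y →
      (∀ e, k < e → e ≤ y → ¬ e ∣ x) →
      IsBest x y (mfDown x (PySem.List.pyRange k 0 (-1))) := by
  intro n
  induction n with
  | zero =>
    intro k hkn hky hno
    rw [PySem.List.pyRange_neg_one_eq_nil (by omega)]
    refine ⟨le_refl 1, Or.inl rfl, ?_⟩
    intro e he1 hed hey
    by_contra h
    exact hno e (by omega) hey hed
  | succ n ih =>
    intro k hkn hky hno
    by_cases hk0 : k ≤ 0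
    · rw [PySem.List.pyRange_neg_one_eq_nil hk0]
      refine ⟨le_refl 1, Or.inl rfl, ?_⟩
      intro e he1 hed hey
      by_contra h
      exact hno e (by omega) hey hed
    · rw [PySem.List.pyRange_neg_one_cons (by omega)]
      simp only [mfDown]
      by_cases hdvd : k ∣ x
      · rw [if_pos ((PySem.Int.mod_eq_zero_iff_dvd x k).mpr hdvd)]
        refine ⟨by omega, Or.inr ⟨hdvd, hky⟩, ?_⟩
        intro e he1 hed hey
        by_contra h
        exact hno e (by omega) hey hed
      · rw [if_neg (by rw [PySem.Int.mod_eq_zero_iff_dvd]; exact hdvd)]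
        apply ih (k - 1) (by omega) (by omega)
        intro e hke hey
        by_cases h : k < e
        · exact hno e h hey
        · have : e = k := by omega
          subst this; exact fun hd => hdvd hd
lemma maxFactorB_isBest (x y : Int) (hx : 1 ≤ x) (hxy : y < x) :
    IsBest x y (max_factor_B x y) := by
  unfold max_factor_B
  rw [if_neg (by omega)]
  by_cases hy : 0 ≤ y
  · exact mfDown_isBest x y hx y.toNat y (by omega) (le_refl y) (fun e he hey => by omega)
  · rw [PySem.List.pyRange_neg_one_eq_nil (by omega)]
    refine ⟨le_refl 1, Or.inl rfl, ?_⟩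
    intro e he1 _ hey
    omega

lemma maxFactor_eq (x y : Int) (hx : 1 ≤ x) : max_factor_A x y = max_factor_B x y := by
  by_cases hxy : x ≤ y
  · unfold max_factor_A max_factor_B
    rw [if_pos hxy, if_pos hxy]
  · exact isBest_uniq x y _ _ (maxFactorA_isBest x y hx (by omega)) (maxFactorB_isBest x y hx (by omega))

-- A's recursive accumulator loop coincides step by step with B's foldl over the same pairs.
lemma fls_eq : ∀ (pairs : List (Int × Int)) (mts : Int) (acc : List Int),
    (∀ p ∈ pairs, 1 ≤ p.1) →
    flsLoopA pairs mts acc =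
      (pairs.foldl
        (fun (st : List Int × Int) p =>
          let d := max_factor_B p.1 (min p.2 st.2)
          (st.1 ++ [d], PySem.Int.floordiv st.2 d))
        (acc, mts)).1 := by
  intro pairs
  induction pairs with
  | nil => intro mts acc _; rfl
  | cons p rest ih =>
    intro mts acc hpos
    obtain ⟨g, m⟩ := p
    simp only [flsLoopA, List.foldl_cons]
    rw [maxFactor_eq g (min m mts) (hpos (g, m) List.mem_cons_self)]
    exact ih _ _ (fun q hq => hpos q (List.mem_cons_of_mem _ hq))

-- ===== VERDICT (by name: the statement is the Claim_ definition above) =====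
theorem find_local_size_spec : Claim_equal_find_local_size := by
  intro global_size max_local_sizes max_total_local_size _ hpre
  unfold Spec_find_local_size find_local_size find_local_size_alt
  exact fls_eq _ _ _ hpre
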